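-- pv_equiv track=rewrite | github.com/daniel-reich/ubiquitous-fiesta | TY2mJcZR8LBWepu7T_12.py | risiko
-- ===== SOURCE A (Python) =====
-- def risiko(attacker, defender):
--   DEF_loses = 0
--   sort_ATK = sorted(attacker, reverse = True)
--   sort_DEF = sorted(defender, reverse = True)
--
--   for i in range(len(sort_ATK)):
--     for j in range(len(sort_DEF)):
--       if i == j:
--         if sort_ATK[i] > sort_DEF[j]:
--           DEF_loses += 1
--
--   return DEF_loses
-- ===== SOURCE B (Python) =====
-- def risiko(attacker, defender):
--     pairs = zip(sorted(attacker, reverse=True), sorted(defender, reverse=True))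
--     return sum(1 for a, d in pairs if a > d)
-- ===== Notes on version B (the rewrite author's own statement) =====
-- stated objective: faster
-- what changed: Replaces the O(n*m) nested index loops (which only act when i==j) by a single pass over the zip of the two descending-sorted lists, counting pairwise attacker wins.
import Mathlib
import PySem

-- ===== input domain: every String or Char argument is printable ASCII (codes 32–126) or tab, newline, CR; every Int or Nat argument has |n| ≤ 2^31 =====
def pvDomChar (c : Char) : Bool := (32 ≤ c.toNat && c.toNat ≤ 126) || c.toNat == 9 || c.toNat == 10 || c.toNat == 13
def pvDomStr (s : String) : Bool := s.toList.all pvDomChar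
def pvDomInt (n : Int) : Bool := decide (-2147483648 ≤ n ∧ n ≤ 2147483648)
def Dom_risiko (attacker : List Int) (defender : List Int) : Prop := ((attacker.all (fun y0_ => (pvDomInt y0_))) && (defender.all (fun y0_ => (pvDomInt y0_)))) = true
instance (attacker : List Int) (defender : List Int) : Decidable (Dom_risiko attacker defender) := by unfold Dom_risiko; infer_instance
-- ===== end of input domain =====

-- B replaces A's O(n*m) nested index loops (active only when i==j) by one pass over the
-- zip of the two descending-sorted lists; objective: faster (asymptotic).

-- ===== PORT A =====
def risiko (attacker : List Int) (defender : List Int) : Int :=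
  let DEF_loses : Int := 0
  let sortATK := PySem.List.sorted attacker (fun x => x) true
  let sortDEF := PySem.List.sorted defender (fun x => x) true
  (PySem.List.pyRange 0 sortATK.length 1).foldl (fun acc i =>
    (PySem.List.pyRange 0 sortDEF.length 1).foldl (fun acc2 j =>
      if i == j then
        if PySem.List.pyGetD sortATK i 0 > PySem.List.pyGetD sortDEF j 0 then acc2 + 1 else acc2
      else acc2) acc) DEF_loses

-- ===== PORT B =====
def risiko_alt (attacker : List Int) (defender : List Int) : Int :=
  let pairs := (PySem.List.sorted attacker (fun x => x) true).zip
               (PySem.List.sorted defender (fun x => x) true)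
  (pairs.map (fun p => if p.1 > p.2 then (1 : Int) else 0)).sum

-- ===== PRECONDITION & SPEC =====
def Spec_risiko (attacker : List Int) (defender : List Int) (out : Int) : Prop := out = risiko_alt attacker defender
instance (attacker : List Int) (defender : List Int) (out : Int) : Decidable (Spec_risiko attacker defender out) := by unfold Spec_risiko; infer_instance

-- ===== CLAIM (what is proved, stated in full; the proofs are below) =====
def Claim_equal_risiko : Prop := ∀ (attacker : List Int) (defender : List Int), Dom_risiko attacker defender → Spec_risiko attacker defender (risiko attacker defender)

-- ===== LEMMAS AND PROOFS =====

-- a fold that only acts on elements equal to i, when i is not in the list, is the identity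
theorem pv_foldl_id_of_not_mem (l : List Int) (i : Int) (g : Int → Int) (acc : Int)
    (h : i ∉ l) :
    l.foldl (fun a j => if j == i then g a else a) acc = acc := by
  induction l generalizing acc with
  | nil => rfl
  | cons x t ih =>
    simp only [List.mem_cons, not_or] at h
    rw [List.foldl_cons, if_neg (by simp only [beq_iff_eq]; exact fun he => h.1 he.symm : ¬ ((x == i) = true))]
    exact ih acc h.2

-- a fold that acts (as g) exactly at elements equal to i, over a Nodup list
theorem pv_foldl_ite_single (l : List Int) (i : Int) (g : Int → Int) (acc : Int)
    (hnd : l.Nodup) :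
    l.foldl (fun a j => if j == i then g a else a) acc
      = if i ∈ l then g acc else acc := by
  induction l generalizing acc with
  | nil => rfl
  | cons x t ih =>
    simp only [List.nodup_cons] at hnd
    rw [List.foldl_cons]
    by_cases hx : x = i
    · subst hx
      rw [if_pos (by simp), if_pos (List.mem_cons_self)]
      exact pv_foldl_id_of_not_mem t x g (g acc) hnd.1
    · rw [if_neg (by simp only [beq_iff_eq]; exact hx : ¬ ((x == i) = true)),
        ih acc hnd.2]
      by_cases hm : i ∈ t
      · rw [if_pos hm, if_pos (List.mem_cons_of_mem x hm)]
      · rw [if_neg hm, if_neg (by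
          simp only [List.mem_cons, not_or]
          exact ⟨fun he => hx he.symm, hm⟩)]

-- counting fold = acc + countP
theorem pv_foldl_count {α : Type} (l : List α) (P : α → Bool) (acc : Int) :
    l.foldl (fun a x => if P x then a + 1 else a) acc
      = acc + (l.countP P : Int) := by
  induction l generalizing acc with
  | nil => simp
  | cons x t ih =>
    simp only [List.foldl_cons, List.countP_cons]
    by_cases h : P x
    · rw [if_pos h, ih]; simp [h]; ring
    · rw [if_neg h, ih]; simp [h]

-- the index-count equals the zip-count
theorem pv_range_count_eq_zip (xs ys : List Int) :
    (List.range xs.length).countP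
        (fun (k : Nat) => decide (k < ys.length) && decide (ys.getD k 0 < xs.getD k 0))
      = (xs.zip ys).countP (fun p => decide (p.2 < p.1)) := by
  induction xs generalizing ys with
  | nil => simp
  | cons x xs ih =>
    cases ys with
    | nil =>
      simp only [List.zip_nil_right, List.countP_nil]
      apply List.countP_eq_zero.mpr
      intro k _
      simp
    | cons y ys =>
      simp only [List.length_cons]
      rw [List.range_succ_eq_map, List.countP_cons, List.countP_map]
      rw [List.countP_congr
        (q := fun (k : Nat) => decide (k < ys.length) && decide (ys.getD k 0 < xs.getD k 0))
        (fun k _ => by simp), ih ys]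
      simp only [List.zip_cons_cons, List.countP_cons]
      simp

-- sum of 0/1 map = countP (as Int)
theorem pv_sum_map_ite (l : List (Int × Int)) :
    (l.map (fun p => if p.1 > p.2 then (1 : Int) else 0)).sum
      = (l.countP (fun p => decide (p.2 < p.1)) : Int) := by
  induction l with
  | nil => simp
  | cons p t ih =>
    simp only [List.map_cons, List.sum_cons, List.countP_cons, ih]
    by_cases h : p.2 < p.1
    · simp [h, gt_iff_lt]; ring
    · simp [h, gt_iff_lt]

-- core equality for arbitrary lists (applied to the two sorted lists)
theorem pv_core (xs ys : List Int) :
    (PySem.List.pyRange 0 xs.length 1).foldl (fun acc i =>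
      (PySem.List.pyRange 0 ys.length 1).foldl (fun acc2 j =>
        if i == j then
          if PySem.List.pyGetD xs i 0 > PySem.List.pyGetD ys j 0 then acc2 + 1 else acc2
        else acc2) acc) 0
    = ((xs.zip ys).map (fun p => if p.1 > p.2 then (1 : Int) else 0)).sum := by
  have hinner : ∀ (acc i : Int),
      (PySem.List.pyRange 0 ys.length 1).foldl (fun acc2 j =>
        if i == j then
          if PySem.List.pyGetD xs i 0 > PySem.List.pyGetD ys j 0 then acc2 + 1 else acc2
        else acc2) acc
      = if i ∈ PySem.List.pyRange 0 ys.length 1 then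
          (if PySem.List.pyGetD xs i 0 > PySem.List.pyGetD ys i 0 then acc + 1 else acc)
        else acc := by
    intro acc i
    rw [← pv_foldl_ite_single (PySem.List.pyRange 0 ys.length 1) i
      (fun a => if PySem.List.pyGetD xs i 0 > PySem.List.pyGetD ys i 0 then a + 1 else a) acc
      (PySem.List.nodup_pyRange_one 0 ys.length)]
    apply PySem.List.foldl_congr_mem
    intro a j _
    by_cases hji : j = i
    · subst hji; simp
    · rw [if_neg (by simp only [beq_iff_eq]; exact fun h => hji h.symm : ¬ ((i == j) = true)),
        if_neg (by simp only [beq_iff_eq]; exact hji : ¬ ((j == i) = true))]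
  have hfun : (fun (acc i : Int) =>
      (PySem.List.pyRange 0 ys.length 1).foldl (fun acc2 j =>
        if i == j then
          if PySem.List.pyGetD xs i 0 > PySem.List.pyGetD ys j 0 then acc2 + 1 else acc2
        else acc2) acc)
      = (fun (acc i : Int) =>
        if i ∈ PySem.List.pyRange 0 ys.length 1 then
          (if PySem.List.pyGetD xs i 0 > PySem.List.pyGetD ys i 0 then acc + 1 else acc)
        else acc) := by
    funext acc i; exact hinner acc i
  rw [hfun]
  have houter :
      (PySem.List.pyRange 0 xs.length 1).foldl (fun acc i =>
        if i ∈ PySem.List.pyRange 0 ys.length 1 then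
          (if PySem.List.pyGetD xs i 0 > PySem.List.pyGetD ys i 0 then acc + 1 else acc)
        else acc) (0 : Int)
      = (PySem.List.pyRange 0 xs.length 1).foldl (fun acc i =>
          if (decide (i < (ys.length : Int)) && decide (PySem.List.pyGetD ys i 0 < PySem.List.pyGetD xs i 0)) then acc + 1 else acc) (0 : Int) := by
    apply PySem.List.foldl_congr_mem
    intro acc i hi
    have h0i := (PySem.List.mem_pyRange_one).mp hi
    by_cases hm : i ∈ PySem.List.pyRange 0 ys.length 1
    · have h := (PySem.List.mem_pyRange_one).mp hm
      rw [if_pos hm]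
      have hd : (decide (i < (ys.length : Int)) = true) := by simpa using h.2
      by_cases hc : PySem.List.pyGetD ys i 0 < PySem.List.pyGetD xs i 0 <;>
        simp [hd, hc, gt_iff_lt]
    · rw [if_neg hm]
      have h : ¬ (i < (ys.length : Int)) := by
        intro hlt
        exact hm ((PySem.List.mem_pyRange_one).mpr ⟨h0i.1, hlt⟩)
      simp [h]
  refine houter.trans ?_
  rw [pv_foldl_count, pv_sum_map_ite, zero_add]
  congr 1
  rw [PySem.List.pyRange_one]
  simp only [sub_zero, Int.toNat_natCast]
  rw [List.countP_map, ← pv_range_count_eq_zip xs ys]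
  apply List.countP_congr
  intro k _
  simp [Function.comp, PySem.List.pyGetD_natCast]

-- ===== VERDICT (by name: the statement is the Claim_ definition above) =====
theorem risiko_spec : Claim_equal_risiko := by
  intro attacker defender _
  unfold Spec_risiko risiko risiko_alt
  exact pv_core (PySem.List.sorted attacker (fun x => x) true)
                (PySem.List.sorted defender (fun x => x) true)
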